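-- pv_equiv track=rewrite | github.com/ankitmaloo/verl | exp/pg.py | _check_periodic_element
-- ===== SOURCE A (Python) =====
-- def _check_periodic_element(password: str) -> bool:
--     """Check for periodic table elements (first letter capitalized)."""
--     elements = [
--         'He', 'Li', 'Be', 'Ne', 'Na', 'Mg', 'Al', 'Si', 'Cl', 'Ar', 'Ca', 'Sc', 'Ti', 'Cr', 'Mn', 'Fe', 'Co', 'Ni',
--         'Cu', 'Zn', 'Ga', 'Ge', 'As', 'Se', 'Br', 'Kr', 'Rb', 'Sr', 'Zr', 'Nb', 'Mo', 'Tc', 'Ru', 'Rh', 'Pd',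
--         'Ag', 'Cd', 'In', 'Sn', 'Sb', 'Te', 'Xe', 'Cs', 'Ba', 'La', 'Ce', 'Pr', 'Nd', 'Pm', 'Sm', 'Eu', 'Gd',
--         'Tb', 'Dy', 'Ho', 'Er', 'Tm', 'Yb', 'Lu', 'Hf', 'Ta', 'Re', 'Os', 'Ir', 'Pt', 'Au', 'Hg', 'Tl', 'Pb',
--         'Bi', 'Po', 'At', 'Rn', 'Fr', 'Ra', 'Ac', 'Th', 'Pa', 'Np', 'Pu', 'Am', 'Cm', 'Bk', 'Cf', 'Es', 'Fm',
--         'Md', 'No', 'Lr', 'Rf', 'Db', 'Sg', 'Bh', 'Hs', 'Mt', 'Ds', 'Rg', 'Cn', 'Nh', 'Fl', 'Mc', 'Lv', 'Ts', 'Og'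
--     ]
--     return any(element in password for element in elements)
-- ===== SOURCE B (Python) =====
-- _SYMBOLS = frozenset([
--     'He', 'Li', 'Be', 'Ne', 'Na', 'Mg', 'Al', 'Si', 'Cl', 'Ar', 'Ca', 'Sc', 'Ti', 'Cr', 'Mn', 'Fe', 'Co', 'Ni',
--     'Cu', 'Zn', 'Ga', 'Ge', 'As', 'Se', 'Br', 'Kr', 'Rb', 'Sr', 'Zr', 'Nb', 'Mo', 'Tc', 'Ru', 'Rh', 'Pd',
--     'Ag', 'Cd', 'In', 'Sn', 'Sb', 'Te', 'Xe', 'Cs', 'Ba', 'La', 'Ce', 'Pr', 'Nd', 'Pm', 'Sm', 'Eu', 'Gd',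
--     'Tb', 'Dy', 'Ho', 'Er', 'Tm', 'Yb', 'Lu', 'Hf', 'Ta', 'Re', 'Os', 'Ir', 'Pt', 'Au', 'Hg', 'Tl', 'Pb',
--     'Bi', 'Po', 'At', 'Rn', 'Fr', 'Ra', 'Ac', 'Th', 'Pa', 'Np', 'Pu', 'Am', 'Cm', 'Bk', 'Cf', 'Es', 'Fm',
--     'Md', 'No', 'Lr', 'Rf', 'Db', 'Sg', 'Bh', 'Hs', 'Mt', 'Ds', 'Rg', 'Cn', 'Nh', 'Fl', 'Mc', 'Lv', 'Ts', 'Og'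
-- ])
--
--
-- def _check_periodic_element(password: str) -> bool:
--     """Single sliding-window pass: every symbol is 2 chars, so check each adjacent pair."""
--     for a, b in zip(password, password[1:]):
--         if a + b in _SYMBOLS:
--             return True
--     return False
-- ===== Notes on version B (the rewrite author's own statement) =====
-- stated objective: alternative
-- what changed: Instead of scanning the password once per element (103 substring searches), B makes a single sliding-window pass over adjacent character pairs, testing each 2-char window against a prebuilt set of symbols.
import Mathlib
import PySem

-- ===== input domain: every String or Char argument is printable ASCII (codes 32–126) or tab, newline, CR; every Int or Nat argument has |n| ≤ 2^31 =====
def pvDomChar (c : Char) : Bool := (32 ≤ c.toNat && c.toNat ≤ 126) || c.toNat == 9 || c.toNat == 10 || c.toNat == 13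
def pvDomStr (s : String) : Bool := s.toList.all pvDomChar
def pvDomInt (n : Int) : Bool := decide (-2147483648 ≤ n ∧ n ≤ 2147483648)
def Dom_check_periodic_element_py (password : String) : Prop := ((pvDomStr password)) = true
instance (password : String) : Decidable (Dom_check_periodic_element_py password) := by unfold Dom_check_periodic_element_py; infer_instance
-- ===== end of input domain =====

-- B replaces A's per-element substring scans by ONE sliding-window pass over adjacent
-- character pairs against a prebuilt table (objective: alternative algorithm, same result).

-- ===== PORT A =====
def pvElements : List String := [
  "He", "Li", "Be", "Ne", "Na", "Mg", "Al", "Si", "Cl", "Ar", "Ca", "Sc", "Ti", "Cr", "Mn", "Fe", "Co", "Ni",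
  "Cu", "Zn", "Ga", "Ge", "As", "Se", "Br", "Kr", "Rb", "Sr", "Zr", "Nb", "Mo", "Tc", "Ru", "Rh", "Pd",
  "Ag", "Cd", "In", "Sn", "Sb", "Te", "Xe", "Cs", "Ba", "La", "Ce", "Pr", "Nd", "Pm", "Sm", "Eu", "Gd",
  "Tb", "Dy", "Ho", "Er", "Tm", "Yb", "Lu", "Hf", "Ta", "Re", "Os", "Ir", "Pt", "Au", "Hg", "Tl", "Pb",
  "Bi", "Po", "At", "Rn", "Fr", "Ra", "Ac", "Th", "Pa", "Np", "Pu", "Am", "Cm", "Bk", "Cf", "Es", "Fm",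
  "Md", "No", "Lr", "Rf", "Db", "Sg", "Bh", "Hs", "Mt", "Ds", "Rg", "Cn", "Nh", "Fl", "Mc", "Lv", "Ts", "Og"]

-- any(element in password for element in elements)
def check_periodic_element_py (password : String) : Bool :=
  pvElements.any (fun element => PySem.Str.isIn element password)

-- ===== PORT B =====
-- the frozenset of symbols, as the (already distinct) char pairs the window is compared with
def pvSymbolPairs : List (Char × Char) := [
  ('H','e'), ('L','i'), ('B','e'), ('N','e'), ('N','a'), ('M','g'), ('A','l'), ('S','i'), ('C','l'),
  ('A','r'), ('C','a'), ('S','c'), ('T','i'), ('C','r'), ('M','n'), ('F','e'), ('C','o'), ('N','i'),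
  ('C','u'), ('Z','n'), ('G','a'), ('G','e'), ('A','s'), ('S','e'), ('B','r'), ('K','r'), ('R','b'),
  ('S','r'), ('Z','r'), ('N','b'), ('M','o'), ('T','c'), ('R','u'), ('R','h'), ('P','d'), ('A','g'),
  ('C','d'), ('I','n'), ('S','n'), ('S','b'), ('T','e'), ('X','e'), ('C','s'), ('B','a'), ('L','a'),
  ('C','e'), ('P','r'), ('N','d'), ('P','m'), ('S','m'), ('E','u'), ('G','d'), ('T','b'), ('D','y'),
  ('H','o'), ('E','r'), ('T','m'), ('Y','b'), ('L','u'), ('H','f'), ('T','a'), ('R','e'), ('O','s'),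
  ('I','r'), ('P','t'), ('A','u'), ('H','g'), ('T','l'), ('P','b'), ('B','i'), ('P','o'), ('A','t'),
  ('R','n'), ('F','r'), ('R','a'), ('A','c'), ('T','h'), ('P','a'), ('N','p'), ('P','u'), ('A','m'),
  ('C','m'), ('B','k'), ('C','f'), ('E','s'), ('F','m'), ('M','d'), ('N','o'), ('L','r'), ('R','f'),
  ('D','b'), ('S','g'), ('B','h'), ('H','s'), ('M','t'), ('D','s'), ('R','g'), ('C','n'), ('N','h'),
  ('F','l'), ('M','c'), ('L','v'), ('T','s'), ('O','g')]

-- for a, b in zip(password, password[1:]): if a + b in _SYMBOLS: return True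
def pvWindowScan : List Char → Bool
  | a :: b :: rest => if pvSymbolPairs.contains (a, b) then true else pvWindowScan (b :: rest)
  | _ => false

def check_periodic_element_py_alt (password : String) : Bool :=
  pvWindowScan password.toList

-- ===== PRECONDITION & SPEC =====
def Spec_check_periodic_element_py (password : String) (out : Bool) : Prop := out = check_periodic_element_py_alt password
instance (password : String) (out : Bool) : Decidable (Spec_check_periodic_element_py password out) := by unfold Spec_check_periodic_element_py; infer_instance

-- ===== CLAIM (what is proved, stated in full; the proofs are below) =====
def Claim_equal_check_periodic_element_py : Prop := ∀ (password : String), Dom_check_periodic_element_py password → Spec_check_periodic_element_py password (check_periodic_element_py password)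

-- ===== LEMMAS AND PROOFS =====

-- every element's character list is exactly its pair's two characters
theorem pvElements_toList : pvElements.map String.toList
    = pvSymbolPairs.map (fun p => [p.1, p.2]) := by decide

-- the window scan finds exactly the lists [a, b] (with (a,b) in the table) occurring as infixes
theorem pvWindowScan_iff (l : List Char) :
    pvWindowScan l = true ↔ ∃ p ∈ pvSymbolPairs, [p.1, p.2] <:+: l := by
  induction l with
  | nil =>
    simp [pvWindowScan]
  | cons a t ih =>
    match t, ih with
    | [], _ =>
      simp [pvWindowScan]
      intro x y _ h
      have := h.length_le; simp at this
    | b :: rest, ih =>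
      rw [pvWindowScan]
      split_ifs with hmem
      · simp only [true_iff]
        exact ⟨(a, b), by simpa using hmem, ⟨[], rest, rfl⟩⟩
      · rw [ih]
        constructor
        · rintro ⟨p, hp, hinf⟩
          exact ⟨p, hp, hinf.trans (List.infix_cons_iff.mpr (Or.inr (List.infix_refl _)))⟩
        · rintro ⟨p, hp, hinf⟩
          refine ⟨p, hp, ?_⟩
          rcases List.infix_cons_iff.mp hinf with hpre | hrest
          · -- [p.1, p.2] is a prefix of a :: b :: rest, so p = (a, b), contradicting hmem
            obtain ⟨s, hs⟩ := hpre
            cases p with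
            | mk x y =>
              simp at hs
              obtain ⟨hx, hy, -⟩ := hs
              exact absurd (by simpa [hx, hy] using hp) (by simpa using hmem)
          · exact hrest

-- ===== VERDICT (by name: the statement is the Claim_ definition above) =====
theorem check_periodic_element_py_spec : Claim_equal_check_periodic_element_py := by
  intro password _
  unfold Spec_check_periodic_element_py check_periodic_element_py check_periodic_element_py_alt
  rw [Bool.eq_iff_iff, List.any_eq_true, pvWindowScan_iff]
  constructor
  · rintro ⟨e, he, hin⟩
    rw [PySem.Str.isIn_iff_infix] at hin
    have : e.toList ∈ pvSymbolPairs.map (fun p => [p.1, p.2]) := by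
      rw [← pvElements_toList]; exact List.mem_map_of_mem he
    obtain ⟨p, hp, hpe⟩ := List.mem_map.mp this
    exact ⟨p, hp, hpe ▸ hin⟩
  · rintro ⟨p, hp, hinf⟩
    have : [p.1, p.2] ∈ pvElements.map String.toList := by
      rw [pvElements_toList]; exact List.mem_map_of_mem hp
    obtain ⟨e, he, hee⟩ := List.mem_map.mp this
    exact ⟨e, he, (PySem.Str.isIn_iff_infix _ _).mpr (hee ▸ hinf)⟩
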